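-- pv_equiv track=rewrite | github.com/PRKKILLER/Algorithm_Practice | Company-OA/SnowFlake/Product-of-nonoverlapping-PalindromeSubseq.py | solution
-- ===== SOURCE A (Python) =====
-- def solution(s: str) -> int:
--     size = len(s)
--     dp = [[0 for _ in range(size)] for _ in range(size)]
--
--     for i in range(size):
--         dp[i][i] = 1
--
--     for d in range(1, size):
--         for i in range(size - d):
--             j = i + d
--             if s[i] == s[j]:
--                 dp[i][j] = dp[i + 1][j - 1] + 2
--             else:
--                 dp[i][j] = max(dp[i + 1][j], dp[i][j - 1])
--
--     res = 0
--     for i in range(size - 1):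
--         res = max(res, dp[0][i] * dp[i + 1][size - 1])
--
--     return res
-- ===== SOURCE B (Python) =====
-- def solution(s: str) -> int:
--     n = len(s)
--     memo = {}
--
--     def lps(i, j):
--         if i > j:
--             return 0
--         if i == j:
--             return 1
--         if (i, j) in memo:
--             return memo[(i, j)]
--         if s[i] == s[j]:
--             v = lps(i + 1, j - 1) + 2
--         else:
--             v = max(lps(i + 1, j), lps(i, j - 1))
--         memo[(i, j)] = v
--         return v
--
--     res = 0
--     for i in range(n - 1):
--         res = max(res, lps(0, i) * lps(i + 1, n - 1))
--     return res
-- ===== Notes on version B (the rewrite author's own statement) =====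
-- stated objective: alternative
-- what changed: Replaces A's bottom-up diagonal-order fill of a full n-by-n table with a top-down memoized recursion lps(i,j) over shrinking intervals (dict memo, computed on demand), combined as max over splits of lps(0,i)*lps(i+1,n-1).
import Mathlib
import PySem

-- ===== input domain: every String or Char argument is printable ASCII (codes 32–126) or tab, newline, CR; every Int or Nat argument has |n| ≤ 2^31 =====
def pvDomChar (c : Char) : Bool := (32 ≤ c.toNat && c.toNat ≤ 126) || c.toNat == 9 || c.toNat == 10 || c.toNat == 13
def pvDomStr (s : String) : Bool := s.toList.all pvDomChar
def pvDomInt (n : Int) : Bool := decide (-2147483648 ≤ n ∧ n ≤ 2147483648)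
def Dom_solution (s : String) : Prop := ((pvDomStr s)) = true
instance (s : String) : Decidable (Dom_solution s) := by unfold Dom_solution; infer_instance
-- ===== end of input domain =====

-- B replaces A's bottom-up diagonal-order n×n table fill with a top-down memoized
-- recursion over shrinking intervals (dict memo, computed on demand); equal return values proved.

-- ===== PORT A =====
-- dp[i][j] read/write helpers (indices are always in range where A uses them)
def pvG (dp : List (List Int)) (i j : Nat) : Int := (dp.getD i []).getD j 0
def pvSet (dp : List (List Int)) (i j : Nat) (v : Int) : List (List Int) :=
  dp.set i ((dp.getD i []).set j v)

def solution (s : String) : Int :=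
  let cs := s.toList
  let size := cs.length
  let dp0 : List (List Int) := List.replicate size (List.replicate size 0)
  -- for i in range(size): dp[i][i] = 1
  let dp1 := (List.range size).foldl (fun dp i => pvSet dp i i 1) dp0
  -- for d in range(1, size): for i in range(size - d): ...
  let dp2 := (List.range' 1 (size - 1)).foldl (fun dp d =>
      (List.range (size - d)).foldl (fun dp i =>
        let j := i + d
        if cs.getD i ' ' = cs.getD j ' ' then
          pvSet dp i j (pvG dp (i+1) (j-1) + 2)
        else
          pvSet dp i j (max (pvG dp (i+1) j) (pvG dp i (j-1)))) dp) dp1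
  -- res loop
  (List.range (size - 1)).foldl
    (fun res i => max res (pvG dp2 0 i * pvG dp2 (i+1) (size - 1))) 0

-- ===== PORT B =====
-- B's helper lps(i, j): top-down recursion with a dict memo threaded through
def lpsM (cs : List Char) (i j : Nat) (memo : PySem.Dict (Nat × Nat) Int) :
    Int × PySem.Dict (Nat × Nat) Int :=
  if _h1 : j < i then (0, memo)            -- if i > j: return 0
  else if _h2 : i = j then (1, memo)       -- if i == j: return 1
  else
    match memo.get? (i, j) with            -- if (i, j) in memo: return memo[(i, j)]
    | some v => (v, memo)
    | none =>
      if cs.getD i ' ' = cs.getD j ' ' then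
        let r := lpsM cs (i+1) (j-1) memo
        (r.1 + 2, r.2.insert (i, j) (r.1 + 2))
      else
        let r1 := lpsM cs (i+1) j memo
        let r2 := lpsM cs i (j-1) r1.2
        (max r1.1 r2.1, r2.2.insert (i, j) (max r1.1 r2.1))
termination_by j - i
decreasing_by all_goals omega

def solution_alt (s : String) : Int :=
  let cs := s.toList
  let n := cs.length
  -- res = 0; for i in range(n-1): res = max(res, lps(0,i) * lps(i+1,n-1))
  ((List.range (n - 1)).foldl (fun st i =>
      let r1 := lpsM cs 0 i st.2
      let r2 := lpsM cs (i+1) (n-1) r1.2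
      (max st.1 (r1.1 * r2.1), r2.2)) ((0 : Int), PySem.Dict.empty)).1

-- ===== PRECONDITION & SPEC =====
def Spec_solution (s : String) (out : Int) : Prop := out = solution_alt s
instance (s : String) (out : Int) : Decidable (Spec_solution s out) := by unfold Spec_solution; infer_instance

-- ===== CLAIM (what is proved, stated in full; the proofs are below) =====
def Claim_equal_solution : Prop := ∀ (s : String), Dom_solution s → Spec_solution s (solution s)

-- ===== LEMMAS AND PROOFS =====

-- the mathematical spec: length of the longest palindromic subsequence of cs[i..j]
def lps (cs : List Char) (i j : Nat) : Int :=
  if _h1 : j < i then 0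
  else if _h2 : i = j then 1
  else if cs.getD i ' ' = cs.getD j ' ' then lps cs (i+1) (j-1) + 2
  else max (lps cs (i+1) j) (lps cs i (j-1))
termination_by j - i
decreasing_by all_goals omega

lemma lps_lt {cs : List Char} {i j : Nat} (h : j < i) : lps cs i j = 0 := by
  rw [lps]; simp [h]

lemma lps_self (cs : List Char) (i : Nat) : lps cs i i = 1 := by
  rw [lps]; simp

lemma lps_step {cs : List Char} {i j : Nat} (h : i < j) :
    lps cs i j = if cs.getD i ' ' = cs.getD j ' ' then lps cs (i+1) (j-1) + 2
      else max (lps cs (i+1) j) (lps cs i (j-1)) := by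
  rw [lps]; simp [Nat.not_lt.mpr (Nat.le_of_lt h), Nat.ne_of_lt h]

lemma getD_set_self {α : Type} (l : List α) (i : Nat) (x d : α) (h : i < l.length) :
    (l.set i x).getD i d = x := by
  simp [List.getD_eq_getElem?_getD, h]

lemma getD_set_ne {α : Type} (l : List α) (a i : Nat) (x : α) (d : α) (h : a ≠ i) :
    (l.set a x).getD i d = l.getD i d := by
  simp [List.getD_eq_getElem?_getD, List.getElem?_set_ne h]

def Shape (dp : List (List Int)) (n : Nat) : Prop :=
  dp.length = n ∧ ∀ i, i < n → (dp.getD i []).length = n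

lemma Shape_pvSet {dp : List (List Int)} {n : Nat} (h : Shape dp n) (a b : Nat) (v : Int) :
    Shape (pvSet dp a b v) n := by
  obtain ⟨h1, h2⟩ := h
  refine ⟨by simp [pvSet, h1], fun i hi => ?_⟩
  by_cases hia : a = i
  · subst hia
    rw [pvSet, getD_set_self _ _ _ _ (by omega)]
    rw [List.length_set]
    exact h2 _ hi
  · rw [pvSet, getD_set_ne _ _ _ _ _ hia]; exact h2 i hi

lemma pvG_pvSet {dp : List (List Int)} {n : Nat} (h : Shape dp n) {a b : Nat}
    (ha : a < n) (hb : b < n) (v : Int) (i j : Nat) :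
    pvG (pvSet dp a b v) i j = if i = a ∧ j = b then v else pvG dp i j := by
  obtain ⟨h1, h2⟩ := h
  by_cases hia : i = a
  · subst hia
    rw [pvG, pvSet, getD_set_self _ _ _ _ (by omega)]
    by_cases hjb : j = b
    · subst hjb
      rw [getD_set_self _ _ _ _ (by rw [h2 i ha]; exact hb)]
      simp
    · rw [getD_set_ne _ _ _ _ _ (fun hh => hjb hh.symm)]
      simp [hjb, pvG]
  · rw [pvG, pvSet, getD_set_ne _ _ _ _ _ (fun hh => hia hh.symm)]
    simp [fun h' : i = a => hia h', pvG]

-- invariant for A's table after processing all diagonals up to gap d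
def InvD (cs : List Char) (n d : Nat) (dp : List (List Int)) : Prop :=
  Shape dp n ∧ ∀ i j, i < n → j < n → j - i ≤ d → pvG dp i j = lps cs i j

-- the diagonal-initialisation fold
lemma diag_fold (n : Nat) (m : Nat) (hm : m ≤ n) :
    Shape ((List.range m).foldl (fun dp i => pvSet dp i i 1)
        (List.replicate n (List.replicate n 0))) n ∧
    ∀ i j, i < n → j < n →
      pvG ((List.range m).foldl (fun dp i => pvSet dp i i 1)
        (List.replicate n (List.replicate n 0))) i j
      = if i = j ∧ i < m then 1 else 0 := by
  induction m with
  | zero =>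
      refine ⟨⟨by simp, fun i hi => by simp [List.getD_eq_getElem?_getD, hi]⟩, ?_⟩
      intro i j hi hj
      simp [pvG, List.getD_eq_getElem?_getD, hi, hj]
  | succ m ih =>
      obtain ⟨ihS, ihG⟩ := ih (by omega)
      rw [List.range_succ, List.foldl_append]
      simp only [List.foldl_cons, List.foldl_nil]
      refine ⟨Shape_pvSet ihS _ _ _, ?_⟩
      intro i j hi hj
      rw [pvG_pvSet ihS (by omega) (by omega)]
      by_cases hij : i = m ∧ j = m
      · simp [hij.1, hij.2]
      · rw [if_neg hij, ihG i j hi hj]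
        by_cases h1 : i = j
        · subst h1
          by_cases h2 : i < m
          · have hm1 : i < m + 1 := by omega
            simp [h2, hm1]
          · have hm1 : ¬ i < m + 1 := by
              intro hlt
              exact hij ⟨by omega, by omega⟩
            simp [h2, hm1]
        · simp [h1]

-- inner loop of A (diagonal d), processed k cells
lemma inner_fold (cs : List Char) (n d : Nat) (hd : 1 ≤ d) (dp : List (List Int))
    (h : InvD cs n (d - 1) dp) (k : Nat) (hk : k ≤ n - d) :
    Shape ((List.range k).foldl (fun dp i =>
        let j := i + d
        if cs.getD i ' ' = cs.getD j ' ' then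
          pvSet dp i j (pvG dp (i+1) (j-1) + 2)
        else
          pvSet dp i j (max (pvG dp (i+1) j) (pvG dp i (j-1)))) dp) n ∧
    ∀ i j, i < n → j < n → (j - i ≤ d - 1 ∨ (j - i = d ∧ i < k)) →
      pvG ((List.range k).foldl (fun dp i =>
        let j := i + d
        if cs.getD i ' ' = cs.getD j ' ' then
          pvSet dp i j (pvG dp (i+1) (j-1) + 2)
        else
          pvSet dp i j (max (pvG dp (i+1) j) (pvG dp i (j-1)))) dp) i j = lps cs i j := by
  induction k with
  | zero =>
      refine ⟨h.1, fun i j hi hj hcase => ?_⟩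
      rcases hcase with hle | ⟨_, hik⟩
      · exact h.2 i j hi hj hle
      · omega
  | succ k ih =>
      obtain ⟨ihS, ihG⟩ := ih (by omega)
      rw [List.range_succ, List.foldl_append]
      simp only [List.foldl_cons, List.foldl_nil]
      have hkd : k + d < n := by omega
      constructor
      · split_ifs <;> exact Shape_pvSet ihS _ _ _
      · intro i j hi hj hcase
        have hlt : k < k + d := by omega
        split_ifs with hc
        · rw [pvG_pvSet ihS (by omega) hkd]
          by_cases hij : i = k ∧ j = k + d
          · rw [if_pos hij, hij.1, hij.2]
            rw [ihG (k+1) (k+d-1) (by omega) (by omega) (Or.inl (by omega))]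
            rw [lps_step hlt, if_pos hc]
          · rw [if_neg hij]
            apply ihG i j hi hj
            rcases hcase with hle | ⟨hgap, hik⟩
            · exact Or.inl hle
            · right
              refine ⟨hgap, ?_⟩
              by_cases hik' : i = k
              · exact absurd ⟨hik', by omega⟩ hij
              · omega
        · rw [pvG_pvSet ihS (by omega) hkd]
          by_cases hij : i = k ∧ j = k + d
          · rw [if_pos hij, hij.1, hij.2]
            rw [ihG (k+1) (k+d) (by omega) (by omega) (Or.inl (by omega))]
            rw [ihG k (k+d-1) (by omega) (by omega) (Or.inl (by omega))]
            rw [lps_step hlt, if_neg hc]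
          · rw [if_neg hij]
            apply ihG i j hi hj
            rcases hcase with hle | ⟨hgap, hik⟩
            · exact Or.inl hle
            · right
              refine ⟨hgap, ?_⟩
              by_cases hik' : i = k
              · exact absurd ⟨hik', by omega⟩ hij
              · omega

-- outer loop of A over diagonals
lemma outer_fold (cs : List Char) (n : Nat) (dp1 : List (List Int))
    (h0 : InvD cs n 0 dp1) (t : Nat) (ht : t ≤ n - 1) :
    InvD cs n t ((List.range' 1 t).foldl (fun dp d =>
      (List.range (n - d)).foldl (fun dp i =>
        let j := i + d
        if cs.getD i ' ' = cs.getD j ' ' then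
          pvSet dp i j (pvG dp (i+1) (j-1) + 2)
        else
          pvSet dp i j (max (pvG dp (i+1) j) (pvG dp i (j-1)))) dp) dp1) := by
  induction t with
  | zero => simpa using h0
  | succ t ih =>
      have ih' := ih (by omega)
      rw [List.range'_concat, List.foldl_append]
      simp only [List.foldl_cons, List.foldl_nil, one_mul]
      have hd : 1 ≤ 1 + t := by omega
      have hmain := inner_fold cs n (1 + t) hd _ (by simpa using ih') (n - (1 + t)) (le_refl _)
      refine ⟨hmain.1, fun i j hi hj hle => ?_⟩
      apply hmain.2 i j hi hj
      by_cases hgap : j - i ≤ t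
      · exact Or.inl (by omega)
      · exact Or.inr ⟨by omega, by omega⟩

-- B-side: every value stored in the memo is the true interval-LPS value
def MemoOK (cs : List Char) (memo : PySem.Dict (Nat × Nat) Int) : Prop :=
  ∀ i j v, memo.get? (i, j) = some v → v = lps cs i j

lemma MemoOK_insert {cs : List Char} {memo : PySem.Dict (Nat × Nat) Int}
    (h : MemoOK cs memo) {a b : Nat} {v : Int} (hv : v = lps cs a b) :
    MemoOK cs (memo.insert (a, b) v) := by
  intro i j w hw
  rw [PySem.Dict.get?_insert] at hw
  split_ifs at hw with hk
  · cases hw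
    obtain ⟨h1, h2⟩ := Prod.mk.injEq .. ▸ hk
    subst h1; subst h2
    simpa using hv
  · exact h i j w hw

lemma lpsM_spec (cs : List Char) (i j : Nat) (memo : PySem.Dict (Nat × Nat) Int) :
    MemoOK cs memo →
    (lpsM cs i j memo).1 = lps cs i j ∧ MemoOK cs (lpsM cs i j memo).2 := by
  induction i, j, memo using lpsM.induct cs with
  | case1 i j memo h1 =>
      intro h
      rw [lpsM]
      simp only [dif_pos h1]
      exact ⟨(lps_lt h1).symm, h⟩
  | case2 j memo h1 =>
      intro h
      rw [lpsM]
      simp only [dif_neg h1]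
      exact ⟨(lps_self cs j).symm, h⟩
  | case3 i j memo h1 h2 v hv =>
      intro h
      rw [lpsM]
      simp only [dif_neg h1, dif_neg h2, hv]
      exact ⟨h i j v hv, h⟩
  | case4 i j memo h1 h2 hv hc ih =>
      intro h
      obtain ⟨ih1, ih2⟩ := ih h
      rw [lpsM]
      simp only [dif_neg h1, dif_neg h2, hv, if_pos hc]
      have hval : (lpsM cs (i+1) (j-1) memo).1 + 2 = lps cs i j := by
        rw [lps_step (show i < j by omega), if_pos hc, ih1]
      exact ⟨hval, MemoOK_insert ih2 hval⟩
  | case5 i j memo h1 h2 hv hc r1 ihl ihr =>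
      intro h
      obtain ⟨ihl1, ihl2⟩ := ihl h
      obtain ⟨ihr1, ihr2⟩ := ihr ihl2
      rw [lpsM]
      simp only [dif_neg h1, dif_neg h2, hv, if_neg hc]
      have hval : max (lpsM cs (i+1) j memo).1
          (lpsM cs i (j-1) (lpsM cs (i+1) j memo).2).1 = lps cs i j := by
        rw [lps_step (show i < j by omega), if_neg hc, ihl1, ihr1]
      exact ⟨hval, MemoOK_insert ihr2 hval⟩

-- B's driver fold computes the pure fold over lps
lemma alt_fold (cs : List Char) (n : Nat) (l : List Nat) :
    ∀ (res : Int) (memo : PySem.Dict (Nat × Nat) Int), MemoOK cs memo →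
    (l.foldl (fun st i =>
      let r1 := lpsM cs 0 i st.2
      let r2 := lpsM cs (i+1) (n-1) r1.2
      (max st.1 (r1.1 * r2.1), r2.2)) (res, memo)).1
    = l.foldl (fun res i => max res (lps cs 0 i * lps cs (i+1) (n-1))) res := by
  induction l with
  | nil => intro res memo _; rfl
  | cons x xs ih =>
      intro res memo hmemo
      simp only [List.foldl_cons]
      obtain ⟨h11, h12⟩ := lpsM_spec cs 0 x memo hmemo
      obtain ⟨h21, h22⟩ := lpsM_spec cs (x+1) (n-1) _ h12
      rw [ih _ _ h22, h11, h21]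

lemma foldl_congr_on {α β : Type} (l : List β) (f g : α → β → α) (a : α)
    (h : ∀ x ∈ l, ∀ acc, f acc x = g acc x) : l.foldl f a = l.foldl g a := by
  induction l generalizing a with
  | nil => rfl
  | cons x xs ih =>
      rw [List.foldl_cons, List.foldl_cons, h x (by simp)]
      exact ih (g a x) (fun y hy acc => h y (by simp [hy]) acc)

-- ===== VERDICT (by name: the statement is the Claim_ definition above) =====
theorem solution_spec : Claim_equal_solution := by
  intro s _
  unfold Spec_solution
  simp only [solution, solution_alt]
  set cs := s.toList with hcs
  set n := cs.length with hn
  have hempty : MemoOK cs PySem.Dict.empty := by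
    intro i j v hv
    simp [PySem.Dict.get?_empty] at hv
  rw [alt_fold cs n _ 0 _ hempty]
  by_cases h2 : n < 2
  · rw [show n - 1 = 0 from by omega]
    simp
  · have hdiag := diag_fold n n (le_refl n)
    have h0 : InvD cs n 0 ((List.range n).foldl (fun dp i => pvSet dp i i 1)
        (List.replicate n (List.replicate n 0))) := by
      refine ⟨hdiag.1, fun i j hi hj hle => ?_⟩
      rw [hdiag.2 i j hi hj]
      by_cases hij : i = j
      · subst hij
        simp [hi, lps_self]
      · have hji : j < i := by omega
        rw [if_neg (fun hh => hij hh.1), lps_lt hji]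
    have hA := outer_fold cs n _ h0 (n-1) (le_refl _)
    apply foldl_congr_on
    intro x hx acc
    have hxlt : x < n - 1 := List.mem_range.mp hx
    rw [hA.2 0 x (by omega) (by omega) (by omega),
        hA.2 (x+1) (n-1) (by omega) (by omega) (by omega)]
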